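-- pv_equiv track=rewrite | github.com/nezapajek/project-tobamo | analysis/references/get_genus_representatives.py | gap_openings
-- ===== SOURCE A (Python) =====
-- def gap_openings(seq_a: str, seq_b: str) -> int:
--     gaps_a = sum(1 for i in range(1, len(seq_a)) if seq_a[i] == "-" and seq_a[i - 1] != "-")
--     gaps_b = sum(1 for i in range(1, len(seq_b)) if seq_b[i] == "-" and seq_b[i - 1] != "-")
--
--     if seq_a.endswith("-") and gaps_a > 0:
--         gaps_a -= 1
--     if seq_b.endswith("-") and gaps_b > 0:
--         gaps_b -= 1
--     return gaps_a + gaps_b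
-- ===== SOURCE B (Python) =====
-- def gap_openings(seq_a: str, seq_b: str) -> int:
--     # Different algorithm: compress each sequence to its run characters
--     # (adjacent-duplicate-free string), then count '-' runs strictly
--     # between the first and last run.
--     def interior(s: str) -> int:
--         runs = []
--         for c in s:
--             if not runs or runs[-1] != c:
--                 runs.append(c)
--         return sum(1 for c in runs[1:-1] if c == "-")
--     return interior(seq_a) + interior(seq_b)
-- ===== Notes on version B (the rewrite author's own statement) =====
-- stated objective: alternative
-- what changed: A scans index pairs counting non-dash-to-dash transitions and then patches off a trailing gap; B first compresses each sequence to its run characters (adjacent-duplicate-free string) and counts the dash runs strictly between the first and last run, with no adjustment step.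
import Mathlib
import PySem

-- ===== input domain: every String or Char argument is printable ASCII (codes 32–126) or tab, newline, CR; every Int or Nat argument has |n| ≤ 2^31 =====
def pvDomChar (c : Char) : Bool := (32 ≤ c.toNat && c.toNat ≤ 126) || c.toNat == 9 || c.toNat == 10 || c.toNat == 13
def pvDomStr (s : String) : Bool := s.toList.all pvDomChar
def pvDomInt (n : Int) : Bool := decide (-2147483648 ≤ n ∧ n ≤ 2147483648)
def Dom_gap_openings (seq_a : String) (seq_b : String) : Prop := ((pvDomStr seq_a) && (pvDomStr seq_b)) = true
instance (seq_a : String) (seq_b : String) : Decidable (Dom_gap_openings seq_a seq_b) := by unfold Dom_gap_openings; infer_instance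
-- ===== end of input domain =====

-- B replaces A's pairwise index scan with trailing-dash adjustment by run-length
-- compression of the string followed by counting the strictly interior dash runs
-- (objective: alternative algorithm, same cost).

-- ===== PORT A =====
-- sum(1 for i in range(1, len(s)) if s[i] == "-" and s[i-1] != "-")
def pvGapsScan (s : List Char) : Int :=
  ((PySem.List.pyRange 1 (s.length : Int) 1).filter (fun i =>
    PySem.List.pyGetD s i ' ' == '-' && !(PySem.List.pyGetD s (i - 1) ' ' == '-'))).length

def gap_openings (seq_a : String) (seq_b : String) : Int :=
  let gaps_a := pvGapsScan seq_a.toList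
  let gaps_b := pvGapsScan seq_b.toList
  let gaps_a := if PySem.Str.endswith seq_a "-" ∧ gaps_a > 0 then gaps_a - 1 else gaps_a
  let gaps_b := if PySem.Str.endswith seq_b "-" ∧ gaps_b > 0 then gaps_b - 1 else gaps_b
  gaps_a + gaps_b

-- ===== PORT B =====
-- the loop body: if not runs or runs[-1] != c: runs.append(c)
def pvRleStep (runs : List Char) (c : Char) : List Char :=
  if runs.isEmpty || !(PySem.List.pyGet? runs (-1) == some c) then runs ++ [c] else runs

-- run-compress s, then sum(1 for c in runs[1:-1] if c == "-")
def pvInterior (s : List Char) : Int :=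
  let runs := s.foldl pvRleStep []
  (((PySem.List.slice runs (some 1) (some (-1))).filter (fun c => c == '-')).length : Int)

def gap_openings_alt (seq_a : String) (seq_b : String) : Int :=
  pvInterior seq_a.toList + pvInterior seq_b.toList

-- ===== PRECONDITION & SPEC =====
def Spec_gap_openings (seq_a : String) (seq_b : String) (out : Int) : Prop := out = gap_openings_alt seq_a seq_b
instance (seq_a : String) (seq_b : String) (out : Int) : Decidable (Spec_gap_openings seq_a seq_b out) := by unfold Spec_gap_openings; infer_instance

-- ===== CLAIM (what is proved, stated in full; the proofs are below) =====
def Claim_equal_gap_openings : Prop := ∀ (seq_a : String) (seq_b : String), Dom_gap_openings seq_a seq_b → Spec_gap_openings seq_a seq_b (gap_openings seq_a seq_b)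

-- ===== LEMMAS AND PROOFS =====

-- A's scan, recast as a prev-char recursion: pvOc p t counts dash runs opening inside p::t
def pvOc : Char → List Char → Nat
  | _, [] => 0
  | p, c :: t => (if c = '-' ∧ p ≠ '-' then 1 else 0) + pvOc c t

-- structural version of B's run-compression fold: runs of s, merging a leading run of p
def pvRleFrom : Option Char → List Char → List Char
  | _, [] => []
  | p, c :: t => if p = some c then pvRleFrom p t else c :: pvRleFrom (some c) t

theorem pyRange_one (n : Nat) :
    PySem.List.pyRange 1 ((n + 1 : Nat) : Int) 1 = (List.range n).map (fun k : Nat => (1 + (k : Int))) := by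
  unfold PySem.List.pyRange
  have h1 : ((n + 1 : Nat) : Int) = (n : Int) + 1 := by push_cast; ring
  rw [if_neg (by norm_num)]
  have h2 : (if 0 < (1 : Int) then (if (1 : Int) < ((n + 1 : Nat) : Int) then ((((n + 1 : Nat) : Int) - 1 + 1 - 1) / 1).toNat else 0) else if ((n + 1 : Nat) : Int) < 1 then ((1 - ((n + 1 : Nat) : Int) + -1 - 1) / (-1)).toNat else 0) = n := by
    rw [if_pos (by norm_num)]
    rcases Nat.eq_zero_or_pos n with h | h
    · subst h; norm_num
    · rw [if_pos (by omega), h1]; norm_num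
  rw [h2]
  exact List.map_congr_left (fun k _ => by ring)

theorem pvCnt (t : List Char) (x : Char) :
    ((List.range t.length).filter (fun k => ((x :: t).getD (k + 1) ' ' == '-') && !((x :: t).getD k ' ' == '-'))).length = pvOc x t := by
  induction t generalizing x with
  | nil => rfl
  | cons y r ih =>
    rw [List.length_cons, List.range_succ_eq_map, List.filter_cons, List.filter_map]
    have hc : ∀ k : Nat, ((fun k => ((x :: y :: r).getD (k + 1) ' ' == '-') && !((x :: y :: r).getD k ' ' == '-')) ∘ Nat.succ) k
        = (fun k => ((y :: r).getD (k + 1) ' ' == '-') && !((y :: r).getD k ' ' == '-')) k := by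
      intro k; simp
    rw [List.filter_congr (fun k _ => hc k)]
    have ihy := ih y
    simp only [List.getD_eq_getElem?_getD, List.getElem?_cons_succ] at ihy
    simp only [List.getD_eq_getElem?_getD, List.getElem?_cons_succ, List.getElem?_cons_zero]
    by_cases hy : y = '-'
    · subst hy
      by_cases hx : x = '-'
      · subst hx
        simp [List.length_map, ihy, pvOc]
      · simp [hx, List.length_map, ihy, pvOc, Nat.add_comm]
    · simp [hy, List.length_map, ihy, pvOc]

theorem pvGapsScan_cons (x : Char) (t : List Char) : pvGapsScan (x :: t) = (pvOc x t : Int) := by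
  unfold pvGapsScan
  rw [show (((x :: t).length : Nat) : Int) = ((t.length + 1 : Nat) : Int) by simp]
  rw [pyRange_one, List.filter_map, List.length_map]
  rw [← pvCnt t x]
  refine congrArg (fun n : Nat => (n : Int)) (congrArg List.length (List.filter_congr ?_))
  intro k _
  simp only [Function.comp_apply]
  have h2 : (1 + (k : Int) - 1) = ((k : Nat) : Int) := by omega
  have h1 : (1 + (k : Int)) = ((k + 1 : Nat) : Int) := by push_cast; ring
  rw [h2, h1, PySem.List.pyGetD_natCast, PySem.List.pyGetD_natCast]

theorem pvSlice_interior (l : List Char) :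
    PySem.List.slice l (some 1) (some (-1)) = (l.drop 1).dropLast := by
  cases l with
  | nil => decide
  | cons x t => simp [PySem.List.slice, List.dropLast_eq_take]

theorem pvFoldl_rleStep (s acc : List Char) :
    s.foldl pvRleStep acc = acc ++ pvRleFrom acc.getLast? s := by
  induction s generalizing acc with
  | nil => simp [pvRleFrom]
  | cons c t ih =>
    rcases acc.eq_nil_or_concat with rfl | ⟨a', l, rfl⟩
    · have h : pvRleStep [] c = [c] := by simp [pvRleStep]
      simp [List.foldl_cons, h, ih, pvRleFrom]
    · simp only [List.concat_eq_append]
      by_cases hlc : l = c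
      · subst hlc
        have hb : pvRleStep (a' ++ [l]) l = a' ++ [l] := by
          simp [pvRleStep]
        simp [List.foldl_cons, hb, ih, pvRleFrom]
      · have hb : pvRleStep (a' ++ [l]) c = (a' ++ [l]) ++ [c] := by
          simp [pvRleStep, hlc]
        rw [List.foldl_cons, hb, ih]
        simp [pvRleFrom, hlc]

theorem pvCount_rleFrom (t : List Char) (p : Char) :
    (pvRleFrom (some p) t).count '-' = pvOc p t := by
  induction t generalizing p with
  | nil => simp [pvRleFrom, pvOc]
  | cons c r ih =>
    by_cases hpc : p = c
    · subst hpc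
      simp [pvRleFrom, pvOc, ih]
    · have h1 : pvRleFrom (some p) (c :: r) = c :: pvRleFrom (some c) r := by
        simp [pvRleFrom, hpc]
      rw [h1, List.count_cons, ih]
      by_cases hc : c = '-'
      · subst hc
        simp [pvOc, hpc, Nat.add_comm]
      · simp [pvOc, hc]

theorem pvLast_rleFrom (t : List Char) (p : Char) :
    (p :: pvRleFrom (some p) t).getLast? = (p :: t).getLast? := by
  induction t generalizing p with
  | nil => simp [pvRleFrom]
  | cons c r ih =>
    by_cases hpc : p = c
    · subst hpc
      simpa [pvRleFrom] using ih p
    · have h1 : pvRleFrom (some p) (c :: r) = c :: pvRleFrom (some c) r := by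
        simp [pvRleFrom, hpc]
      rw [h1, List.getLast?_cons_cons, ih c, List.getLast?_cons_cons]

theorem pvCount_filter (l : List Char) : (l.filter (fun c => c == '-')).length = l.count '-' := by
  simp [List.count_eq_countP, List.countP_eq_length_filter]

theorem pvEndswith_iff (l : List Char) : PySem.Chars.endswith l ['-'] = true ↔ l.getLast? = some '-' := by
  rw [PySem.Chars.endswith_iff, List.getLast?_eq_some_iff]
  exact ⟨fun ⟨p, h⟩ => ⟨p, h.symm⟩, fun ⟨p, h⟩ => ⟨p, h.symm⟩⟩

-- the per-string statement: A's adjusted scan equals B's interior run count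
theorem pvString_eq (s : List Char) :
    (if PySem.Chars.endswith s ['-'] = true ∧ pvGapsScan s > 0 then pvGapsScan s - 1 else pvGapsScan s)
      = pvInterior s := by
  cases s with
  | nil => decide
  | cons x t =>
    have hfold : (x :: t).foldl pvRleStep [] = x :: pvRleFrom (some x) t := by
      simpa [pvRleFrom] using pvFoldl_rleStep (x :: t) []
    have hlast : (x :: pvRleFrom (some x) t).getLast? = (x :: t).getLast? := pvLast_rleFrom t x
    have hcount : (pvRleFrom (some x) t).count '-' = pvOc x t := pvCount_rleFrom t x
    simp only [pvInterior]
    rw [hfold, pvSlice_interior, List.drop_succ_cons, List.drop_zero, pvCount_filter,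
      pvGapsScan_cons]
    rcases (pvRleFrom (some x) t).eq_nil_or_concat with hqe | ⟨q', l, hqc⟩
    · rw [hqe] at hcount ⊢
      have h0 : pvOc x t = 0 := by rw [← hcount]; rfl
      simp [h0]
    · simp only [List.concat_eq_append] at hqc
      rw [hqc] at hcount hlast ⊢
      have hl : (x :: t).getLast? = some l := by
        rw [← hlast]
        rw [show x :: (q' ++ [l]) = (x :: q') ++ [l] from rfl]
        exact List.getLast?_concat
      rw [List.dropLast_concat]
      by_cases hld : l = '-'
      · subst hld
        have hcnt : (q' ++ ['-']).count '-' = q'.count '-' + 1 := by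
          simp [List.count_append]
        rw [hcnt] at hcount
        have hpos : (pvOc x t : Int) > 0 := by omega
        rw [if_pos ⟨(pvEndswith_iff _).mpr hl, hpos⟩]
        omega
      · have hcnt : (q' ++ [l]).count '-' = q'.count '-' := by
          simp [List.count_append, hld]
        rw [hcnt] at hcount
        rw [if_neg ?_]
        · omega
        · rintro ⟨he, -⟩
          rw [pvEndswith_iff] at he
          rw [he] at hl
          exact hld (Option.some_inj.mp hl).symm

-- ===== VERDICT (by name: the statement is the Claim_ definition above) =====
theorem gap_openings_spec : Claim_equal_gap_openings := by
  intro seq_a seq_b _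
  unfold Spec_gap_openings gap_openings gap_openings_alt
  simp only [PySem.Str.endswith_eq, show ("-" : String).toList = ['-'] from rfl]
  rw [← pvString_eq seq_a.toList, ← pvString_eq seq_b.toList]
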